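-- pv_equiv track=rewrite | github.com/Odrec/deeplecture | useful_functions.py | split_metadata_period
-- ===== SOURCE A (Python) =====
-- def split_metadata_period(metadata_list):
--     choices = set()
--     for data in metadata_list:
--         if isinstance(data, str):
--             if '|' in data:
--                 choices.update(data.split('|'))
--             else:
--                 choices.add(data)
--     return sorted(choices)
-- ===== SOURCE B (Python) =====
-- def _insert_unique(xs, x):
--     """Insert x into the sorted duplicate-free list xs (in place), keeping it sorted and duplicate-free."""
--     i = 0
--     while i < len(xs) and xs[i] < x:
--         i += 1
--     if i == len(xs) or xs[i] != x:
--         xs.insert(i, x)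
--     return xs
--
--
-- def split_metadata_period(metadata_list):
--     result = []
--     for data in metadata_list:
--         if isinstance(data, str):
--             if '|' in data:
--                 for tok in data.split('|'):
--                     result = _insert_unique(result, tok)
--             else:
--                 result = _insert_unique(result, data)
--     return result
-- ===== Notes on version B (the rewrite author's own statement) =====
-- stated objective: alternative
-- what changed: Replaces the hash-set collection plus final sort with a single pass that keeps the result as a sorted duplicate-free list at all times, scanning for each token's ordered position and inserting it there (insertion-union); no set and no sort call.
import Mathlib
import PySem

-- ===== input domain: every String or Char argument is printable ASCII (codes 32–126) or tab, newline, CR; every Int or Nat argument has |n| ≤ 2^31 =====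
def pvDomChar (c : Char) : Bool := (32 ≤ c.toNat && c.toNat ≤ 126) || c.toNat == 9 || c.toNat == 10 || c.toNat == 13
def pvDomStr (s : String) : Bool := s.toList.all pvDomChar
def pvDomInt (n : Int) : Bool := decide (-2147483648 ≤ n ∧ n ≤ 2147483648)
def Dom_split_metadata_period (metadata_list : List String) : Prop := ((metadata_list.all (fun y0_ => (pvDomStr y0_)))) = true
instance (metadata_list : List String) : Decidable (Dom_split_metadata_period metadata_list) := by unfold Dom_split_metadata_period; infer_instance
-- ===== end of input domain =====

-- B keeps the result as a sorted duplicate-free list throughout, scanning for each token's ordered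
-- position and inserting it there, instead of A's hash-set collection followed by a final sort
-- (alternative decomposition; B's helper mutates only B's own local list).


-- ===== PORT A =====
-- 'data.split('|')' has a non-empty separator, so PySem.Str.split? is always 'some'; '.getD []' only discharges the Option.
def split_metadata_period (metadata_list : List String) : List String :=
  let choices : PySem.Set String :=
    metadata_list.foldl (fun choices data =>
      if PySem.Str.isIn "|" data then
        PySem.Set.update choices ((PySem.Str.split? data "|").getD [])
      else
        PySem.Set.add choices data) PySem.Set.empty
  PySem.List.sorted choices (fun x => x) false

-- ===== PORT B =====
-- the 'while i < len(xs) and xs[i] < x: i += 1' scan of _insert_unique, as structural recursion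
def pvFindIdx (xs : List String) (x : String) : Nat :=
  match xs with
  | [] => 0
  | y :: ys => if y < x then pvFindIdx ys x + 1 else 0

-- B's helper _insert_unique; 'i == len(xs) or xs[i] != x' with short-circuit 'or' is exactly
-- 'i = xs.length ∨ xs[i]? ≠ some x' since xs[i]? = none only when i = xs.length here
def pvInsertUnique (xs : List String) (x : String) : List String :=
  let i := pvFindIdx xs x
  if i = xs.length ∨ xs[i]? ≠ some x then PySem.List.insert xs (i : Int) x else xs

def split_metadata_period_alt (metadata_list : List String) : List String :=
  metadata_list.foldl (fun result data =>
    if PySem.Str.isIn "|" data then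
      ((PySem.Str.split? data "|").getD []).foldl pvInsertUnique result
    else
      pvInsertUnique result data) []

-- ===== PRECONDITION & SPEC =====
def Spec_split_metadata_period (metadata_list : List String) (out : List String) : Prop := out = split_metadata_period_alt metadata_list
instance (metadata_list : List String) (out : List String) : Decidable (Spec_split_metadata_period metadata_list out) := by unfold Spec_split_metadata_period; infer_instance

-- ===== CLAIM (what is proved, stated in full; the proofs are below) =====
def Claim_equal_split_metadata_period : Prop := ∀ (metadata_list : List String), Dom_split_metadata_period metadata_list → Spec_split_metadata_period metadata_list (split_metadata_period metadata_list)

-- ===== LEMMAS AND PROOFS =====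

-- the list of tokens both programs process, in order
def pvTokens (metadata_list : List String) : List String :=
  metadata_list.foldl (fun tokens data =>
    if PySem.Str.isIn "|" data then
      tokens ++ ((PySem.Str.split? data "|").getD [])
    else
      tokens ++ [data]) []

lemma pvTokens_from (metadata_list : List String) (acc : List String) :
    metadata_list.foldl (fun tokens data =>
      if PySem.Str.isIn "|" data then
        tokens ++ ((PySem.Str.split? data "|").getD [])
      else
        tokens ++ [data]) acc = acc ++ pvTokens metadata_list := by
  induction metadata_list generalizing acc with
  | nil => simp [pvTokens]
  | cons d l ih =>
    simp only [List.foldl_cons, pvTokens]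
    rw [ih]
    conv_rhs => rw [ih]
    split_ifs <;> simp

lemma pvChoices_eq (metadata_list : List String) (s : PySem.Set String) :
    metadata_list.foldl (fun choices data =>
      if PySem.Str.isIn "|" data then
        PySem.Set.update choices ((PySem.Str.split? data "|").getD [])
      else
        PySem.Set.add choices data) s = PySem.Set.update s (pvTokens metadata_list) := by
  induction metadata_list generalizing s with
  | nil => simp [pvTokens, PySem.Set.update]
  | cons d l ih =>
    have hupd : ∀ (t : PySem.Set String) (a b : List String),
        PySem.Set.update t (a ++ b) = PySem.Set.update (PySem.Set.update t a) b := by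
      intro t a b; simp [PySem.Set.update, List.foldl_append]
    have hTok : pvTokens (d :: l)
        = (if PySem.Str.isIn "|" d then ((PySem.Str.split? d "|").getD []) else [d])
          ++ pvTokens l := by
      simp only [pvTokens, List.foldl_cons]
      rw [pvTokens_from]
      split_ifs <;> simp [pvTokens]
    simp only [List.foldl_cons]
    rw [ih, hTok, hupd]
    split_ifs <;> simp [pvTokens]

-- B's fold over the entries equals one fold of pvInsertUnique over all tokens
lemma pvB_fold_tokens (metadata_list : List String) (acc : List String) :
    metadata_list.foldl (fun result data =>
      if PySem.Str.isIn "|" data then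
        ((PySem.Str.split? data "|").getD []).foldl pvInsertUnique result
      else
        pvInsertUnique result data) acc
      = (pvTokens metadata_list).foldl pvInsertUnique acc := by
  induction metadata_list generalizing acc with
  | nil => simp [pvTokens]
  | cons d l ih =>
    have hTok : pvTokens (d :: l)
        = (if PySem.Str.isIn "|" d then ((PySem.Str.split? d "|").getD []) else [d])
          ++ pvTokens l := by
      simp only [pvTokens, List.foldl_cons]
      rw [pvTokens_from]
      split_ifs <;> simp [pvTokens]
    rw [List.foldl_cons, hTok, List.foldl_append]
    split_ifs <;> exact ih _

-- recursive restatement of _insert_unique, used only to reason about pvInsertUnique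
def pvInsRec (xs : List String) (x : String) : List String :=
  match xs with
  | [] => [x]
  | y :: ys =>
    if x < y then x :: y :: ys
    else if x = y then y :: ys
    else y :: pvInsRec ys x

lemma pvFindIdx_le (xs : List String) (x : String) : pvFindIdx xs x ≤ xs.length := by
  induction xs with
  | nil => simp [pvFindIdx]
  | cons y ys ih =>
    simp only [pvFindIdx, List.length_cons]
    split_ifs <;> omega

lemma pvInsertUnique_eq_rec (xs : List String) (x : String) :
    pvInsertUnique xs x = pvInsRec xs x := by
  induction xs with
  | nil => simp [pvInsertUnique, pvFindIdx, pvInsRec, PySem.List.insert_zero]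
  | cons y ys ih =>
    by_cases hyx : y < x
    · have hk := pvFindIdx_le ys x
      have hfi : pvFindIdx (y :: ys) x = pvFindIdx ys x + 1 := by
        simp [pvFindIdx, hyx]
      have hins : PySem.List.insert (y :: ys) ((pvFindIdx ys x + 1 : Nat) : Int) x
          = y :: PySem.List.insert ys ((pvFindIdx ys x : Nat) : Int) x := by
        rw [PySem.List.insert_natCast _ _ _ (by simpa using Nat.succ_le_succ hk),
            PySem.List.insert_natCast _ _ _ hk]
        simp
      have hget : (y :: ys)[pvFindIdx ys x + 1]? = ys[pvFindIdx ys x]? := by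
        simp
      have hrec : pvInsRec (y :: ys) x = y :: pvInsRec ys x := by
        have h1 : ¬ x < y := by exact not_lt.mpr (le_of_lt hyx)
        have h2 : x ≠ y := fun h => absurd (h ▸ hyx) (lt_irrefl _)
        simp [pvInsRec, h1, h2]
      rw [hrec, ← ih]
      simp only [pvInsertUnique, hfi, hget, List.length_cons]
      by_cases hc : pvFindIdx ys x = ys.length ∨ ys[pvFindIdx ys x]? ≠ some x
      · rw [if_pos ?_, if_pos hc, hins]
        rcases hc with h | h
        · exact Or.inl (by omega)
        · exact Or.inr h
      · rw [if_neg ?_, if_neg hc]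
        push Not at hc ⊢
        exact ⟨by omega, hc.2⟩
    · have hfi : pvFindIdx (y :: ys) x = 0 := by simp [pvFindIdx, hyx]
      by_cases hxy : x = y
      · subst hxy
        simp [pvInsertUnique, pvInsRec, hfi]
      · have hx_lt : x < y := lt_of_le_of_ne (not_lt.mp hyx) hxy
        simp [pvInsertUnique, pvInsRec, hfi, hx_lt, Ne.symm hxy, PySem.List.insert_zero]

lemma mem_pvInsRec (xs : List String) (x y : String) :
    y ∈ pvInsRec xs x ↔ y = x ∨ y ∈ xs := by
  induction xs with
  | nil => simp [pvInsRec]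
  | cons z zs ih =>
    simp only [pvInsRec]
    split_ifs with h1 h2
    · simp only [List.mem_cons]
    · subst h2
      simp only [List.mem_cons]; tauto
    · simp only [List.mem_cons, ih]; tauto

lemma pairwise_pvInsRec (xs : List String) (x : String)
    (h : xs.Pairwise (· < ·)) : (pvInsRec xs x).Pairwise (· < ·) := by
  induction xs with
  | nil => simp [pvInsRec]
  | cons z zs ih =>
    rcases List.pairwise_cons.mp h with ⟨hz, hzs⟩
    simp only [pvInsRec]
    split_ifs with h1 h2
    · refine List.pairwise_cons.mpr ⟨?_, h⟩
      intro y hy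
      rcases List.mem_cons.mp hy with rfl | hy
      · exact h1
      · exact lt_trans h1 (hz y hy)
    · exact h
    · have hzx : z < x := lt_of_le_of_ne (not_lt.mp h1) (Ne.symm h2)
      refine List.pairwise_cons.mpr ⟨?_, ih hzs⟩
      intro y hy
      rcases (mem_pvInsRec zs x y).mp hy with rfl | hy
      · exact hzx
      · exact hz y hy

lemma pvFold_insert_pairwise (ts : List String) (acc : List String)
    (h : acc.Pairwise (· < ·)) : (ts.foldl pvInsRec acc).Pairwise (· < ·) := by
  induction ts generalizing acc with
  | nil => exact h
  | cons t ts ih => exact ih _ (pairwise_pvInsRec acc t h)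

lemma pvFold_insert_mem (ts : List String) (acc : List String) (y : String) :
    y ∈ ts.foldl pvInsRec acc ↔ y ∈ acc ∨ y ∈ ts := by
  induction ts generalizing acc with
  | nil => simp
  | cons t ts ih =>
    rw [List.foldl_cons, ih, mem_pvInsRec]
    simp [List.mem_cons]; tauto

-- A's result characterised
lemma pvA_eq (metadata_list : List String) :
    split_metadata_period metadata_list
      = PySem.List.sorted (PySem.Set.ofList (pvTokens metadata_list)) (fun x => x) false := by
  unfold split_metadata_period
  rw [pvChoices_eq]
  simp [PySem.Set.empty, PySem.Set.update_nil_left]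

-- ===== VERDICT (by name: the statement is the Claim_ definition above) =====
theorem split_metadata_period_spec : Claim_equal_split_metadata_period := by
  intro metadata_list _
  unfold Spec_split_metadata_period
  rw [pvA_eq]
  unfold split_metadata_period_alt
  rw [pvB_fold_tokens]
  have hfun : pvInsertUnique = pvInsRec :=
    funext fun xs => funext fun x => pvInsertUnique_eq_rec xs x
  rw [hfun]
  have hlt : ((pvTokens metadata_list).foldl pvInsRec []).Pairwise (· < ·) :=
    pvFold_insert_pairwise _ [] (by simp)
  have hnd1 : ((pvTokens metadata_list).foldl pvInsRec []).Nodup := hlt.imp ne_of_lt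
  have hnd2 : (PySem.Set.ofList (pvTokens metadata_list)).Nodup :=
    PySem.Set.nodup_ofList _
  have hperm : ((pvTokens metadata_list).foldl pvInsRec []).Perm
      (PySem.Set.ofList (pvTokens metadata_list)) := by
    apply List.perm_of_nodup_nodup_toFinset_eq hnd1 hnd2
    apply Finset.ext
    intro y
    simp only [List.mem_toFinset]
    rw [pvFold_insert_mem, PySem.Set.mem_ofList _ y]
    simp
  exact PySem.List.sorted_eq_of_perm_of_pairwise_lt _ _ (fun x => x) hperm hlt
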